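-- pv_equiv track=rewrite | github.com/llulai/advent_of_code_py | aoc/aoc2019/__init__.py | has_consecutive_no_larger
-- ===== SOURCE A (Python) =====
-- def has_consecutive_no_larger(num):
--     str_num = str(num)
--
--     curr_digit = ''
--     curr_count = 0
--     repeating = []
--
--     for digit in str_num:
--         if digit == curr_digit:
--             curr_count += 1
--         else:
--             repeating.append(curr_count)
--             curr_count = 1
--         curr_digit = digit
--     repeating.append(curr_count)
--
--     return 2 in repeating
-- ===== SOURCE B (Python) =====
-- def has_consecutive_no_larger(num):
--     # Stateless neighbor-window test: some position starts a run of exactly two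
--     # equal characters; no run lengths are counted or collected.
--     s = str(num)
--     n = len(s)
--     for i in range(n - 1):
--         if s[i] == s[i + 1] and (i == 0 or s[i - 1] != s[i]) and (i + 2 >= n or s[i + 2] != s[i]):
--             return True
--     return False
-- ===== Notes on version B (the rewrite author's own statement) =====
-- stated objective: simpler
-- what changed: Replaces A's stateful run-length accumulation (building a list of all run lengths, then a membership test) with a stateless per-index window test: position i starts a run of exactly two when s[i]==s[i+1] while its left and right-right neighbors differ.
import Mathlib
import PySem

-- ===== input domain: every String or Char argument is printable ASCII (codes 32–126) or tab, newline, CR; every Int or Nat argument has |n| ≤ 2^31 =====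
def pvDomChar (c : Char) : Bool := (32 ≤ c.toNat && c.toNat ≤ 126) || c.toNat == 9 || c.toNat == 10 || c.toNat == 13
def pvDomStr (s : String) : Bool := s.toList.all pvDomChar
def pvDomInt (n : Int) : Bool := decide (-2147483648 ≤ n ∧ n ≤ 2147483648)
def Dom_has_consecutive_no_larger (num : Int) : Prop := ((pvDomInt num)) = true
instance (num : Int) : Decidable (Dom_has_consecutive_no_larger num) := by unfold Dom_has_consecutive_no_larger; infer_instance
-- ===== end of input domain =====

-- B replaces A's run-length accumulation with a stateless per-index neighbor-window test; return values agree everywhere.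

-- ===== PORT A =====
-- state of A's for-loop: curr_digit (Option Char: none = Python's initial ''), curr_count, repeating
def pvAGo (cd : Option Char) (cc : Int) (rep : List Int) : List Char → List Int
  | [] => rep ++ [cc]
  | d :: ds =>
    if some d == cd then pvAGo cd (cc + 1) rep ds
    else pvAGo (some d) 1 (rep ++ [cc]) ds

def has_consecutive_no_larger (num : Int) : Bool :=
  (pvAGo none 0 [] (PySem.Int.toStr num).toList).contains 2

-- ===== PORT B =====
-- Source B's loop body at index i: s[i]==s[i+1] and (i==0 or s[i-1]!=s[i]) and (i+2>=n or s[i+2]!=s[i])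
-- (indices i+1 are in range for i ∈ range(n-1); i-1 and i+2 are guarded, so getD's default is never the value used)
def pvNb (l : List Char) (i : Nat) : Bool :=
  (l.getD i ' ' == l.getD (i + 1) ' ')
  && (i == 0 || l.getD (i - 1) ' ' != l.getD i ' ')
  && (decide (l.length ≤ i + 2) || l.getD (i + 2) ' ' != l.getD i ' ')

def has_consecutive_no_larger_alt (num : Int) : Bool :=
  let l := (PySem.Int.toStr num).toList
  (List.range (l.length - 1)).any (pvNb l)

-- ===== PRECONDITION & SPEC =====
def Spec_has_consecutive_no_larger (num : Int) (out : Bool) : Prop := out = has_consecutive_no_larger_alt num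
instance (num : Int) (out : Bool) : Decidable (Spec_has_consecutive_no_larger num out) := by unfold Spec_has_consecutive_no_larger; infer_instance

-- ===== CLAIM =====
def Claim_equal_has_consecutive_no_larger : Prop := ∀ (num : Int), Dom_has_consecutive_no_larger num → Spec_has_consecutive_no_larger num (has_consecutive_no_larger num)

-- ===== LEMMAS AND PROOFS =====

-- proof device: run-skipping recursion, intermediate between A's accumulation and B's window test
def pvRunLen (c : Char) : List Char → Nat
  | [] => 0
  | x :: xs => if x == c then pvRunLen c xs + 1 else 0

def pvBGo : List Char → Bool
  | [] => false
  | c :: rest =>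
    let k := pvRunLen c rest
    if (1 + (k : Int)) == 2 then true else pvBGo (rest.drop k)
termination_by l => l.length
decreasing_by
  simp only [List.length_drop, List.length_cons]
  omega

-- the accumulator rep is a pure prefix of A's result
theorem pvAGo_rep (l : List Char) : ∀ cd cc rep,
    pvAGo cd cc rep l = rep ++ pvAGo cd cc [] l := by
  induction l with
  | nil => intro cd cc rep; simp [pvAGo]
  | cons d ds ih =>
    intro cd cc rep
    simp only [pvAGo]
    split
    · exact ih _ _ _
    · rw [ih (some d) 1 (rep ++ [cc]), ih (some d) 1 ([] ++ [cc])]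
      simp

theorem pvDrop_runLen (l : List Char) (c : Char) :
    l.drop (pvRunLen c l) = l.dropWhile (fun x => x == c) := by
  induction l with
  | nil => simp [pvRunLen]
  | cons x xs ih =>
    simp only [pvRunLen, List.dropWhile]
    by_cases h : x == c <;> simp [h, ih]

-- A's loop, run-skipped: consuming the run of c at the front in one step
theorem pvAGo_skip (l : List Char) : ∀ (c : Char) (cc : Int),
    pvAGo (some c) cc [] l =
      (cc + (pvRunLen c l : Int)) ::
        (match l.dropWhile (fun x => x == c) with
          | [] => []
          | d :: ds => pvAGo (some d) 1 [] ds) := by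
  induction l with
  | nil => intro c cc; simp [pvAGo, pvRunLen, List.dropWhile]
  | cons x xs ih =>
    intro c cc
    simp only [pvAGo, pvRunLen, List.dropWhile]
    by_cases h : x == c
    · simp only [h, if_pos]
      have : (some x == some c) = true := by simp [h]
      rw [if_pos this, ih c (cc + 1)]
      have : cc + 1 + (pvRunLen c xs : Int) = cc + ((pvRunLen c xs : Int) + 1) := by ring
      simp [this]
    · have hb : (some x == some c) = false := by simp_all
      rw [if_neg (by simp [hb]), pvAGo_rep]
      simp [h]

theorem pvMain (n : Nat) : ∀ (l : List Char) (c : Char), l.length ≤ n →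
    (pvAGo (some c) 1 [] l).contains 2 = pvBGo (c :: l) := by
  induction n with
  | zero =>
    intro l c hl
    have : l = [] := List.eq_nil_of_length_eq_zero (Nat.le_zero.mp hl)
    subst this
    simp [pvAGo, pvRunLen, pvBGo]
  | succ n ih =>
    intro l c hl
    rw [pvAGo_skip, pvBGo]
    simp only [← pvDrop_runLen]
    by_cases h2 : (1 + (pvRunLen c l : Int)) = 2
    · rw [if_pos (by simpa using h2)]
      cases hd : l.drop (pvRunLen c l) <;> simp [← h2]
    · have hne : ((2 : Int) == 1 + (pvRunLen c l : Int)) = false := by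
        simp only [beq_eq_false_iff_ne]
        omega
      rw [if_neg (by simpa using h2)]
      cases hd : l.drop (pvRunLen c l) with
      | nil =>
        simp [pvBGo]
        omega
      | cons d ds =>
        have hlen : ds.length ≤ n := by
          have h1 : (l.drop (pvRunLen c l)).length = l.length - pvRunLen c l :=
            List.length_drop
          rw [hd] at h1
          simp at h1
          omega
        rw [← ih ds d hlen]
        simp
        intro hq
        exact absurd hq.symm h2

theorem pvAKey (l : List Char) :
    (pvAGo none 0 [] l).contains 2 = pvBGo l := by
  cases l with
  | nil => simp [pvAGo, pvBGo]
  | cons h t =>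
    have : pvAGo none 0 [] (h :: t) = pvAGo (some h) 1 [0] t := by
      simp [pvAGo]
    rw [this, pvAGo_rep, ← pvMain t.length t h (le_refl _)]
    simp

-- basic facts about the front run
theorem pvRunLen_le (c : Char) (l : List Char) : pvRunLen c l ≤ l.length := by
  induction l with
  | nil => simp [pvRunLen]
  | cons x xs ih =>
    simp only [pvRunLen, List.length_cons]
    split <;> omega

theorem pvRunLen_getD (c : Char) (l : List Char) :
    ∀ i, i < pvRunLen c l → l.getD i ' ' = c := by
  induction l with
  | nil => simp [pvRunLen]
  | cons x xs ih =>
    intro i hi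
    simp only [pvRunLen] at hi
    by_cases h : x == c
    · rw [if_pos h] at hi
      cases i with
      | zero => simpa using h
      | succ j => simpa using ih j (by omega)
    · rw [if_neg h] at hi; omega

theorem pvRunLen_next (c : Char) (l : List Char) (h : pvRunLen c l < l.length) :
    l.getD (pvRunLen c l) ' ' ≠ c := by
  induction l with
  | nil => simp [pvRunLen] at h
  | cons x xs ih =>
    simp only [pvRunLen, List.length_cons] at h ⊢
    by_cases hx : x == c
    · rw [if_pos hx] at h ⊢
      simpa using ih (by omega)
    · rw [if_neg hx]
      simpa using hx

theorem pvGetD_drop (l : List Char) (r j : Nat) :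
    (l.drop r).getD j ' ' = l.getD (r + j) ' ' := by
  simp [List.getD_eq_getElem?_getD, List.getElem?_drop]

-- pvBGo agrees with B's neighbor-window scan
theorem pvBoolExt (a b : Bool) (h : a = true ↔ b = true) : a = b := by
  cases a <;> cases b <;> simp_all

theorem pvBGo_eq_nb (fuel : Nat) : ∀ l : List Char, l.length ≤ fuel →
    pvBGo l = (List.range (l.length - 1)).any (pvNb l) := by
  induction fuel with
  | zero =>
    intro l hl
    have : l = [] := List.eq_nil_of_length_eq_zero (Nat.le_zero.mp hl)
    subst this; simp [pvBGo]
  | succ fuel ih =>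
    intro l hl
    cases l with
    | nil => simp [pvBGo]
    | cons c rest =>
      have hBGo : pvBGo (c :: rest) =
          (if ((1 : Int) + (pvRunLen c rest : Int)) == 2 then true
           else pvBGo (rest.drop (pvRunLen c rest))) := by
        simp [pvBGo]
      set l := c :: rest with hldef
      have hrl : pvRunLen c l = pvRunLen c rest + 1 := by simp [pvRunLen, hldef]
      set r := pvRunLen c l with hr
      have hr1 : 1 ≤ r := by omega
      have hrn : r ≤ l.length := pvRunLen_le c l
      set m := (l.drop r).length with hm
      have hnm : l.length = r + m := by simp [hm]; omega
      have hrun : ∀ i, i < r → l.getD i ' ' = c := pvRunLen_getD c l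
      rw [hBGo]
      have hdrop : rest.drop (pvRunLen c rest) = l.drop r := by
        simp [hldef, hrl]
      by_cases hk : pvRunLen c rest = 1
      · -- run of length exactly 2 at the front: B fires at i = 0
        have hr2 : r = 2 := by omega
        rw [if_pos (by simp [hk])]
        have h0 : 0 ∈ List.range (l.length - 1) := by
          simp [List.mem_range]; omega
        have hnb : pvNb l 0 = true := by
          have e0 : l.getD 0 ' ' = c := hrun 0 (by omega)
          have e1 : l.getD 1 ' ' = c := hrun 1 (by omega)
          by_cases hlen : l.length ≤ 2
          · simp only [List.getD_eq_getElem?_getD] at e0 e1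
            simp [pvNb, List.getD_eq_getElem?_getD, e0, e1, hlen]
          · have e2 : l.getD 2 ' ' ≠ c := by
              have := pvRunLen_next c l (by omega)
              rwa [← hr, hr2] at this
            simp only [List.getD_eq_getElem?_getD] at e0 e1 e2
            simp [pvNb, List.getD_eq_getElem?_getD, e0, e1, e2, hlen]
        exact (List.any_eq_true.mpr ⟨0, h0, hnb⟩).symm
      · rw [if_neg (by simp; omega)]
        rw [hdrop]
        have hml : (l.drop r).length ≤ fuel := by
          simp only [List.length_drop]
          have : l.length ≤ fuel + 1 := hl
          omega
        rw [ih _ hml]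
        have hnext : m ≠ 0 → l.getD r ' ' ≠ c := fun hm0 =>
          pvRunLen_next c l (by omega)
        -- shift: pvNb on the dropped list equals pvNb on l at index r + j
        have hshift : ∀ j, j < m - 1 → pvNb (l.drop r) j = pvNb l (r + j) := by
          intro j hj
          have hm0 : m ≠ 0 := by omega
          have hlen : (List.drop r l).length = m := hm.symm
          apply pvBoolExt
          simp only [pvNb, pvGetD_drop, Bool.and_eq_true, Bool.or_eq_true, beq_iff_eq,
            bne_iff_ne, decide_eq_true_eq, hlen]
          constructor
          · rintro ⟨⟨h1, h2⟩, h3⟩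
            refine ⟨⟨h1, ?_⟩, ?_⟩
            · by_cases hj0 : j = 0
              · subst hj0
                right
                have e : r + 0 - 1 = r - 1 := by omega
                rw [e, hrun (r - 1) (by omega)]
                exact fun hcon => hnext hm0 hcon.symm
              · right
                rcases h2 with h0 | hne
                · exact absurd h0 hj0
                · have e : r + (j - 1) = r + j - 1 := by omega
                  rw [← e]; exact hne
            · rcases h3 with hle | hne
              · left; omega
              · right; exact hne
          · rintro ⟨⟨h1, h2⟩, h3⟩
            refine ⟨⟨h1, ?_⟩, ?_⟩
            · by_cases hj0 : j = 0
              · left; exact hj0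
              · right
                rcases h2 with h0 | hne
                · omega
                · have e : r + (j - 1) = r + j - 1 := by omega
                  rw [e]; exact hne
            · rcases h3 with hle | hne
              · left; omega
              · right; exact hne
        -- inside the front run no index fires
        have hzero : ∀ i, i < r → i < l.length - 1 → pvNb l i = false := by
          intro i hir hin
          by_contra hcon
          have htrue : pvNb l i = true := by
            cases h : pvNb l i
            · exact absurd h hcon
            · rfl
          simp only [pvNb, Bool.and_eq_true, beq_iff_eq, Bool.or_eq_true,
            bne_iff_ne, decide_eq_true_eq] at htrue
          obtain ⟨⟨hab, hbc⟩, hcc⟩ := htrue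
          have hi : l.getD i ' ' = c := hrun i hir
          -- l[i+1] = c forces i+1 < r
          have hi1 : i + 1 < r := by
            by_contra hge
            have he : i + 1 = r := by omega
            have : l.getD r ' ' = c := by rw [← he, ← hab]; exact hi
            exact pvRunLen_next c l (by omega) this
          -- left-neighbor test forces i = 0
          have hi0 : i = 0 := by
            rcases hbc with h0 | hne
            · simpa using h0
            · by_contra hne0
              exact hne (by rw [hrun (i - 1) (by omega), hi])
          subst hi0
          rcases hcc with hlen | hne2
          · omega
          · by_cases h2r : 2 < r
            · exact hne2 (by rw [hrun 2 h2r, hrun 0 (by omega)])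
            · omega
        -- put the two scans in bijection
        apply pvBoolExt
        simp only [List.any_eq_true, List.mem_range]
        constructor
        · rintro ⟨j, hj, hnb⟩
          have hjm : j < m - 1 := by omega
          exact ⟨r + j, by omega, by rw [← hshift j hjm]; exact hnb⟩
        · rintro ⟨i, hi, hnb⟩
          by_cases hir : i < r
          · exact absurd hnb (by simp [hzero i hir hi])
          · refine ⟨i - r, by omega, ?_⟩
            have he : i = r + (i - r) := by omega
            rw [hshift (i - r) (by omega), ← he]
            exact hnb

-- ===== VERDICT =====
theorem has_consecutive_no_larger_spec : Claim_equal_has_consecutive_no_larger := by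
  intro num _
  unfold Spec_has_consecutive_no_larger has_consecutive_no_larger has_consecutive_no_larger_alt
  rw [pvAKey]
  exact pvBGo_eq_nb _ _ (le_refl _)
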